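-- pv_equiv track=rewrite | github.com/LeonLourenco/Parser_Universal | grammar_parser.py | is_promising
-- ===== SOURCE A (Python) =====
-- def is_promising(current_string: str, target_word: str) -> bool:
--     """
--     Verifica se a string atual ainda tem chance de virar a palavra alvo.
--     Retorna False se ela já tiver erros óbvios.
--     """
--     # 1. Poda por Tamanho Excessivo
--     # Se a string atual é maior que o alvo e só tem terminais, já falhou.
--     # (Para gramáticas com regras que aumentam tamanho, como S -> SS)
--     if len(current_string) > len(target_word) + 5: # Tolerância pequena
--         return False
--
--     # 2. Poda por Prefixo (A mais importante!)
--     # Extrai a parte inicial da string que só contém terminais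
--     terminal_prefix = ""
--     for char in current_string:
--         if char.isupper() or char.isdigit(): # Assume que Uppercase/Digitos são Não-Terminais
--             break
--         terminal_prefix += char
--
--     # Verifica se o começo da string bate com o alvo
--     if not target_word.startswith(terminal_prefix):
--         return False
--
--     return True
-- ===== SOURCE B (Python) =====
-- def is_promising(current_string: str, target_word: str) -> bool:
--     if len(current_string) > len(target_word) + 5:
--         return False
--     for i, char in enumerate(current_string):
--         if char.isupper() or char.isdigit():
--             return True
--         if i >= len(target_word) or char != target_word[i]:
--             return False
--     return True
-- ===== Notes on version B (the rewrite author's own statement) =====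
-- stated objective: simpler
-- what changed: B fuses A's build-prefix-string-then-startswith logic into a single indexed pass over current_string that compares each terminal character positionally with target_word, with no intermediate string.
import Mathlib
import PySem

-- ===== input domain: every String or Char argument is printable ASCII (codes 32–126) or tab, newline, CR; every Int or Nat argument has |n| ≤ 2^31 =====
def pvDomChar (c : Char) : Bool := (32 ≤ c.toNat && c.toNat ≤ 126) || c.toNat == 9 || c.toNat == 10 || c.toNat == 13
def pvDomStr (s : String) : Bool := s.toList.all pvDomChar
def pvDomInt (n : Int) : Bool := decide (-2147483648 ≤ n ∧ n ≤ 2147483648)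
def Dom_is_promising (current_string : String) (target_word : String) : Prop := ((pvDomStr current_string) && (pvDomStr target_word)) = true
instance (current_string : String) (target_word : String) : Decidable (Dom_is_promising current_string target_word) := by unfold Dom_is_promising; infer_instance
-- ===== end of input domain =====

-- B fuses A's build-prefix-then-startswith into one indexed pass with no intermediate string (objective: simpler).

-- ===== PORT A =====
-- the prefix-building loop with its `break` (terminal_prefix += char until an upper/digit char)
def pvPrefix : List Char → List Char
  | [] => []
  | c :: rest =>
      if PySem.Chars.isupper c || PySem.Chars.isdigit c then []
      else c :: pvPrefix rest

def is_promising (current_string : String) (target_word : String) : Bool :=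
  if current_string.toList.length > target_word.toList.length + 5 then false
  else
    let terminal_prefix := pvPrefix current_string.toList
    if !(PySem.Chars.startswith target_word.toList terminal_prefix) then false
    else true

-- ===== PORT B =====
-- single pass: i-th char of current_string compared positionally with target_word
def pvAltLoop (target : List Char) : List Char → Nat → Bool
  | [], _ => true
  | c :: rest, i =>
      if PySem.Chars.isupper c || PySem.Chars.isdigit c then true
      else if i ≥ target.length ∨ PySem.List.pyGet? target (i : Int) ≠ some c then false
      else pvAltLoop target rest (i + 1)

def is_promising_alt (current_string : String) (target_word : String) : Bool :=
  if current_string.toList.length > target_word.toList.length + 5 then false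
  else pvAltLoop target_word.toList current_string.toList 0

-- ===== PRECONDITION & SPEC =====
def Spec_is_promising (current_string : String) (target_word : String) (out : Bool) : Prop := out = is_promising_alt current_string target_word
instance (current_string : String) (target_word : String) (out : Bool) : Decidable (Spec_is_promising current_string target_word out) := by unfold Spec_is_promising; infer_instance

-- ===== CLAIM (what is proved, stated in full; the proofs are below) =====
def Claim_equal_is_promising : Prop := ∀ (current_string : String) (target_word : String), Dom_is_promising current_string target_word → Spec_is_promising current_string target_word (is_promising current_string target_word)

-- ===== LEMMAS AND PROOFS =====

theorem pvAltLoop_eq (cs : List Char) (ts : List Char) (i : Nat) :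
    pvAltLoop ts cs i = PySem.Chars.startswith (ts.drop i) (pvPrefix cs) := by
  induction cs generalizing i with
  | nil =>
      simp [pvAltLoop, pvPrefix]
      rw [Bool.eq_iff_iff, PySem.Chars.startswith_iff]
      simp
  | cons c rest ih =>
      by_cases hnt : (PySem.Chars.isupper c || PySem.Chars.isdigit c) = true
      · simp [pvAltLoop, pvPrefix, hnt]
        rw [Bool.eq_iff_iff, PySem.Chars.startswith_iff]
        simp
      · have hR : pvPrefix (c :: rest) = c :: pvPrefix rest := by
          simp only [pvPrefix]
          rw [if_neg (by simpa using hnt)]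
        by_cases hlen : i ≥ ts.length
        · have hdrop : ts.drop i = [] := List.drop_eq_nil_of_le hlen
          have hL : pvAltLoop ts (c :: rest) i = false := by
            simp only [pvAltLoop]
            rw [if_neg (by simpa using hnt), if_pos (Or.inl hlen)]
          rw [hL, Bool.eq_iff_iff, hR, PySem.Chars.startswith_iff, hdrop]
          simp
        · have hlen' : i < ts.length := Nat.lt_of_not_le hlen
          have hget : PySem.List.pyGet? ts (i : Int) = some ts[i] := by
            simp [PySem.List.pyGet?, PySem.List.pyIdx?, hlen']
          have hdrop : ts.drop i = ts[i] :: ts.drop (i + 1) :=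
            List.drop_eq_getElem_cons hlen'
          by_cases hc : c = ts[i]
          · have hcond : ¬(i ≥ ts.length ∨ PySem.List.pyGet? ts (i : Int) ≠ some c) := by
              rw [hget, hc]
              simp [hlen]
            have hL : pvAltLoop ts (c :: rest) i = pvAltLoop ts rest (i + 1) := by
              simp only [pvAltLoop]
              rw [if_neg (by simpa using hnt), if_neg hcond]
            rw [hL, ih, Bool.eq_iff_iff, hR,
              PySem.Chars.startswith_iff, PySem.Chars.startswith_iff, hdrop]
            simp only [List.cons_prefix_cons]
            tauto
          · have hcond : (i ≥ ts.length ∨ PySem.List.pyGet? ts (i : Int) ≠ some c) := by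
              rw [hget]
              exact Or.inr (by simpa using fun h => hc h.symm)
            have hL : pvAltLoop ts (c :: rest) i = false := by
              simp only [pvAltLoop]
              rw [if_neg (by simpa using hnt), if_pos hcond]
            rw [hL, Bool.eq_iff_iff, hR, PySem.Chars.startswith_iff, hdrop]
            simp only [List.cons_prefix_cons]
            tauto

-- ===== VERDICT (by name: the statement is the Claim_ definition above) =====
theorem is_promising_spec : Claim_equal_is_promising := by
  intro cs ts _
  unfold Spec_is_promising is_promising is_promising_alt
  split
  · rfl
  · rw [pvAltLoop_eq]
    simp
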